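-- pv_equiv track=rewrite | github.com/RiccardoMiolato/AdventOfCode | 2023/day13/part1/part1.py | verticalMirror
-- ===== SOURCE A (Python) =====
-- def testVertical(block, j):
--     for k in range(0, j):
--         if j - 1 - k >= 0 and j + k < len(block[0]):
--             for i in range(0, len(block)):
--                 if block[i][j - 1 - k] != block[i][j + k]:
--                     return False
--
--     return True
--
-- def verticalMirror(block):
--     mirror = False
--     for j in range(1, len(block[0])):
--         mirror = True
--
--         for i in range(0, len(block)):
--             if block[i][j - 1] != block[i][j]:
--                 mirror = False
--                 break
--
--         if mirror:
--             if(testVertical(block, j)):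
--                 return j
--             else:
--                 mirror = False
--
--     return 0
-- ===== SOURCE B (Python) =====
-- def verticalMirror(block):
--     w = len(block[0])
--     cols = [tuple(row[j] for row in block) for j in range(w)]
--     mirrors = []
--     prev = [True] * (w + 1)          # even palindromes of length 0 at every start
--     for m in range(1, w // 2 + 1):   # grow even palindromes by interval DP
--         L = 2 * m
--         cur = [cols[a] == cols[a + L - 1] and prev[a + 1] for a in range(w - L + 1)]
--         for j in ([m] if m == w - m else [m, w - m]):
--             if cur[j - m]:           # the window touching the nearer edge is a palindrome
--                 mirrors.append(j)
--         prev = cur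
--     return min(mirrors) if mirrors else 0
-- ===== Notes on version B (the rewrite author's own statement) =====
-- stated objective: alternative
-- what changed: B is a bottom-up dynamic program: it builds the even-length-palindrome table over column intervals with a rolling row (cur[a] from prev[a+1]), records a candidate split j whenever the edge-touching window of length 2*min(j,w-j) becomes a full palindrome, and returns the minimum recorded split; A instead tests each split j independently by expanding reflected column pairs outward with nested row scans.
-- outside the precondition, e.g. on verticalMirror(['ab', 'a']): A returns 0, B raises IndexError; on verticalMirror([]): A raises IndexError, B raises IndexError
import Mathlib
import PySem

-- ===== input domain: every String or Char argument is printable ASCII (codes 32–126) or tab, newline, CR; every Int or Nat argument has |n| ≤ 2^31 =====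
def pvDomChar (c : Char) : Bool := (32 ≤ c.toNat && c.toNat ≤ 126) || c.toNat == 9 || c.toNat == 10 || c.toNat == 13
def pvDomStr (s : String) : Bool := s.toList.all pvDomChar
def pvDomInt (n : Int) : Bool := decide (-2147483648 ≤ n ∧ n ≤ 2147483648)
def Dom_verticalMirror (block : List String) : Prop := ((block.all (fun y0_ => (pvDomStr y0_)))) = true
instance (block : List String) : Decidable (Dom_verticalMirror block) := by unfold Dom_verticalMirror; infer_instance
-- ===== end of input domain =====

-- B replaces A's per-split outward expansion by a bottom-up dynamic program over the
-- even-palindrome table of column intervals (rolling row), collecting candidate splits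
-- and returning their minimum. Equivalence is proved on non-ragged, non-empty grids.


-- ===== PORT A =====
-- len(block[0]); block[0] exists on every input Pre_ admits
def pvWidth (block : List String) : Int :=
  PySem.Str.len ((PySem.List.pyGet? block 0).getD "")

-- inner 'for i in range(0, len(block)): if block[i][a] != block[i][b]: return False'
-- (s[i] via PySem.Str.pyGet?, exact; Pre_ keeps the indices in range)
def pvRowsEqA (block : List String) (a b : Int) : Bool :=
  block.all (fun row => PySem.Str.pyGet? row a == PySem.Str.pyGet? row b)

-- testVertical(block, j)
def pvTestVertical (block : List String) (j : Int) : Bool :=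
  (PySem.List.pyRange 0 j 1).all (fun k =>
    if j - 1 - k ≥ 0 ∧ j + k < pvWidth block then
      pvRowsEqA block (j - 1 - k) (j + k)
    else true)

-- the 'for j in range(1, len(block[0]))' loop with its early return
def pvLoopA (block : List String) : List Int → Int
  | [] => 0
  | j :: rest =>
    if pvRowsEqA block (j - 1) j then
      if pvTestVertical block j then j else pvLoopA block rest
    else pvLoopA block rest

def verticalMirror (block : List String) : Int :=
  pvLoopA block (PySem.List.pyRange 1 (pvWidth block) 1)

-- ===== PORT B =====
-- tuple(row[j] for row in block): one column as a list of chars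
def pvColB (block : List String) (j : Int) : List Char :=
  block.map (fun row => (PySem.Str.pyGet? row j).getD ' ')

-- cols = [tuple(row[j] for row in block) for j in range(w)]
def pvColsB (block : List String) (w : Int) : List (List Char) :=
  (PySem.List.pyRange 0 w 1).map (pvColB block)

-- one iteration of 'for m in range(1, w // 2 + 1)': build cur from prev, record splits
def pvStepB (cols : List (List Char)) (w : Int) (st : List Bool × List Int) (m : Int) :
    List Bool × List Int :=
  let L := 2 * m
  let cur := (PySem.List.pyRange 0 (w - L + 1) 1).map (fun a =>
      (PySem.List.pyGetD cols a [] == PySem.List.pyGetD cols (a + L - 1) []) &&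
      PySem.List.pyGetD st.1 (a + 1) false)
  let js := if m == w - m then [m] else [m, w - m]
  (cur, st.2 ++ js.filter (fun j => PySem.List.pyGetD cur (j - m) false))

def verticalMirror_alt (block : List String) : Int :=
  let w := pvWidth block
  let cols := pvColsB block w
  let st := (PySem.List.pyRange 1 (PySem.Int.floordiv w 2 + 1) 1).foldl (pvStepB cols w)
              (List.replicate (w + 1).toNat true, [])
  if st.2.isEmpty then 0 else (PySem.List.min? st.2 (fun x => x)).getD 0

-- ===== PRECONDITION & SPEC =====
-- Pre_ excludes the empty grid (len(block[0]) raises IndexError in both programs) and ragged grids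
-- with some row shorter than the first row, on which A's outcome (return 0 or IndexError) is an
-- accident of its scan order and B raises while building the transpose.
def Pre_verticalMirror (block : List String) : Prop :=
  block ≠ [] ∧ ∀ row ∈ block, PySem.Str.len (block.headD "") ≤ PySem.Str.len row
instance (block : List String) : Decidable (Pre_verticalMirror block) := by
  unfold Pre_verticalMirror; infer_instance

def pvWitness_verticalMirror : List String := ["#.##.", "#.##.", "..##."]

def Spec_verticalMirror (block : List String) (out : Int) : Prop := out = verticalMirror_alt block
instance (block : List String) (out : Int) : Decidable (Spec_verticalMirror block out) := by unfold Spec_verticalMirror; infer_instance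

-- ===== CLAIM (what is proved, stated in full; the proofs are below) =====
def Claim_equal_verticalMirror : Prop := ∀ (block : List String), Dom_verticalMirror block → Pre_verticalMirror block → Spec_verticalMirror block (verticalMirror block)

-- ===== LEMMAS AND PROOFS =====

-- width as a Nat (length of the first row)
def pvW (block : List String) : Nat := (block.headD "").toList.length

-- one column, Nat index, proof side
def pvColN (block : List String) (a : Nat) : List Char :=
  pvColB block (a : Int)

-- DP row k, entry a: columns a..a+2k-1 form an even palindrome
def pvPalB (block : List String) (k a : Nat) : Bool :=
  (List.range k).all (fun s => pvColN block (a + s) == pvColN block (a + 2 * k - 1 - s))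

def pvRowSpec (block : List String) (wn k : Nat) : List Bool :=
  (List.range (wn - 2 * k + 1)).map (pvPalB block k)

def pvJsOf (wn m : Nat) : List Int :=
  if ((m : Int) == (wn : Int) - (m : Int)) then [(m : Int)] else [(m : Int), (wn : Int) - (m : Int)]

def pvMirSpec (block : List String) (wn k : Nat) : List Int :=
  (List.range' 1 k).flatMap (fun m =>
    (pvJsOf wn m).filter (fun j => pvPalB block m (j - (m : Int)).toNat))

-- the common mirror condition at split jn (A's shape)
def pvMirrorAt (block : List String) (w jn : Nat) : Bool :=
  (List.range (min jn (w - jn))).all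
    (fun t => pvRowsEqA block ((jn : Int) - 1 - (t : Int)) ((jn : Int) + (t : Int)))

lemma pvWidth_eq (block : List String) (h : block ≠ []) : pvWidth block = (pvW block : Int) := by
  cases block with
  | nil => exact absurd rfl h
  | cons r rest =>
    show PySem.Str.len ((PySem.List.pyGet? (r :: rest) 0).getD "") = _
    rw [show (0 : Int) = ((0 : Nat) : Int) by simp, PySem.List.pyGet?_natCast]
    simp [pvW, PySem.Str.len_eq]

-- columns as char lists compare exactly like A's per-row scan
lemma pvColEqN (block : List String) (w : Nat)
    (hrows : ∀ row ∈ block, w ≤ row.toList.length)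
    (a b : Nat) (ha : a < w) (hb : b < w) :
    (pvColN block a == pvColN block b) = pvRowsEqA block (a : Int) (b : Int) := by
  have key : ∀ row ∈ block, ∀ c : Nat, c < w →
      PySem.Str.pyGet? row (c : Int) = some (row.toList.getD c ' ') := by
    intro row hrow c hc
    have hl := hrows row hrow
    rw [PySem.Str.pyGet?_natCast, List.getElem?_eq_getElem (by omega),
        List.getD_eq_getElem _ _ (by omega)]
  rw [Bool.eq_iff_iff]
  simp only [pvColN, pvColB, beq_iff_eq, List.map_inj_left, pvRowsEqA, List.all_eq_true]
  constructor <;> intro h row hrow <;>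
    · have := h row hrow
      rw [key row hrow a ha, key row hrow b hb] at this ⊢
      simpa using this

-- A's per-split condition equals the mirror predicate
lemma pvCondA (block : List String) (hne : block ≠ []) (jn : Nat)
    (h1 : 1 ≤ jn) (h2 : jn < pvW block) :
    (pvRowsEqA block ((jn : Int) - 1) (jn : Int) && pvTestVertical block (jn : Int))
      = pvMirrorAt block (pvW block) jn := by
  rw [Bool.eq_iff_iff]
  simp only [pvTestVertical, pvMirrorAt, pvWidth_eq block hne, PySem.List.pyRange_zero_nat,
    List.all_map, Function.comp, Bool.and_eq_true, List.all_eq_true, List.mem_range]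
  constructor
  · rintro ⟨hadj, hall⟩ t ht
    have := hall t (by omega)
    rwa [if_pos (by constructor <;> omega)] at this
  · intro hm
    refine ⟨?_, ?_⟩
    · have := hm 0 (by omega)
      simpa using this
    · intro t ht
      by_cases hg : ((jn : Int) - 1 - (t : Int) ≥ 0 ∧ (jn : Int) + (t : Int) < ((pvW block : Nat) : Int))
      · rw [if_pos hg]
        exact hm t (by omega)
      · rw [if_neg hg]

-- A's loop returns the head of the ascending filtered range (or 0)
lemma pvLoopA_eq_filter (block : List String) : ∀ (l : List Int),
    pvLoopA block l =
      ((l.filter (fun j => pvRowsEqA block (j - 1) j && pvTestVertical block j)).headD 0) := by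
  intro l
  induction l with
  | nil => rfl
  | cons j rest ih =>
    simp only [pvLoopA, List.filter_cons]
    cases hx : pvRowsEqA block (j - 1) j <;> cases hy : pvTestVertical block j <;>
      simp [ih]


lemma pvJsOf_mem (wn m : Nat) (j : Int) (hm : m ≤ wn) (h : j ∈ pvJsOf wn m) :
    j = ((m : Nat) : Int) ∨ j = ((wn - m : Nat) : Int) := by
  unfold pvJsOf at h
  split at h <;> simp at h
  · left; omega
  · rcases h with h | h
    · left; omega
    · right; omega

-- the mirror predicate at j is the edge-touching even palindrome of half-length min(j, wn-j)
lemma pvMirror_eq_pal (block : List String) (wn : Nat)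
    (hrows : ∀ row ∈ block, wn ≤ row.toList.length)
    (j : Nat) (h1 : 1 ≤ j) (h2 : j < wn) :
    pvMirrorAt block wn j = pvPalB block (min j (wn - j)) (j - min j (wn - j)) := by
  set m := min j (wn - j) with hm
  have hm1 : 1 ≤ m := by omega
  have hmw : 2 * m ≤ wn := by omega
  have hmj : m ≤ j := by omega
  rw [Bool.eq_iff_iff]
  simp only [pvMirrorAt, pvPalB, List.all_eq_true, List.mem_range, ← hm]
  have elem : ∀ t, t < m →
      ((pvColN block (j - m + (m - 1 - t)) == pvColN block (j - m + 2 * m - 1 - (m - 1 - t)))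
        = pvRowsEqA block ((j : Int) - 1 - (t : Int)) ((j : Int) + (t : Int))) := by
    intro t ht
    rw [show j - m + (m - 1 - t) = j - 1 - t by omega,
        show j - m + 2 * m - 1 - (m - 1 - t) = j + t by omega,
        pvColEqN block wn hrows _ _ (by omega) (by omega),
        show ((j - 1 - t : Nat) : Int) = (j : Int) - 1 - (t : Int) by omega,
        show ((j + t : Nat) : Int) = (j : Int) + (t : Int) by omega]
  constructor
  · intro h s hs
    have e := elem (m - 1 - s) (by omega)
    rw [show m - 1 - (m - 1 - s) = s by omega] at e
    rw [e]
    exact h (m - 1 - s) (by omega)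
  · intro h t ht
    rw [← elem t ht]
    exact h (m - 1 - t) (by omega)

-- the DP recurrence: shrink the interval by one column on each side
lemma pvPal_succ (block : List String) (k a : Nat) :
    pvPalB block (k + 1) a =
      ((pvColN block a == pvColN block (a + 2 * (k + 1) - 1)) && pvPalB block k (a + 1)) := by
  rw [Bool.eq_iff_iff]
  simp only [pvPalB, Bool.and_eq_true, List.all_eq_true, List.mem_range]
  constructor
  · intro h
    refine ⟨by simpa using h 0 (by omega), ?_⟩
    intro s hs
    have := h (s + 1) (by omega)
    rw [show a + (s + 1) = a + 1 + s by omega,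
        show a + 2 * (k + 1) - 1 - (s + 1) = a + 1 + 2 * k - 1 - s by omega] at this
    exact this
  · rintro ⟨h0, h⟩ s hs
    cases s with
    | zero => simpa using h0
    | succ s' =>
      have := h s' (by omega)
      rw [show a + 1 + s' = a + (s' + 1) by omega,
          show a + 1 + 2 * k - 1 - s' = a + 2 * (k + 1) - 1 - (s' + 1) by omega] at this
      exact this

-- getD into a mapped range
lemma pvGetD_map_range {α : Type} (f : Nat → α) (n i : Nat) (d : α) (h : i < n) :
    ((List.range n).map f).getD i d = f i := by
  rw [List.getD_eq_getElem _ _ (by simpa using h)]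
  simp

-- the fold computes (rowSpec k, mirSpec k)
set_option maxHeartbeats 1000000 in
lemma pvFold_eq (block : List String) (wn : Nat) :
    ∀ k, k ≤ wn / 2 →
      (PySem.List.pyRange 1 ((k : Int) + 1) 1).foldl
          (pvStepB (pvColsB block ((wn : Int))) ((wn : Int)))
          (List.replicate (((wn : Int) + 1)).toNat true, [])
        = (pvRowSpec block wn k, pvMirSpec block wn k) := by
  have hcol : ∀ a : Nat, a < wn →
      PySem.List.pyGetD (pvColsB block ((wn : Int))) (a : Int) [] = pvColN block a := by
    intro a ha
    simp only [pvColsB, PySem.List.pyRange_zero_natCast, List.map_map]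
    rw [PySem.List.pyGetD_natCast, pvGetD_map_range _ _ _ _ ha]
    rfl
  intro k
  induction k with
  | zero =>
    intro _
    rw [PySem.List.pyRange_one_eq_nil (by omega)]
    have hp0 : pvPalB block 0 = fun _ => true := by
      funext a; simp [pvPalB]
    simp only [List.foldl_nil, pvRowSpec, pvMirSpec, List.range'_zero, List.flatMap_nil, hp0,
      List.map_const', List.length_range, Prod.mk.injEq]
    exact ⟨by congr 1, trivial⟩
  | succ k ih =>
    intro hk
    have hk' : k ≤ wn / 2 := by omega
    rw [show (((k + 1 : Nat) : Int) + 1) = ((k : Int) + 1) + 1 by push_cast; ring,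
        PySem.List.pyRange_one_succ_right (by omega), List.foldl_append, ih hk']
    have hL : ((wn : Int)) - 2 * ((k : Int) + 1) + 1 = ((wn - 2 * (k + 1) + 1 : Nat) : Int) := by
      omega
    -- cur equals rowSpec (k+1)
    have hcur : (PySem.List.pyRange 0 ((wn : Int) - 2 * ((k : Int) + 1) + 1) 1).map (fun a =>
        (PySem.List.pyGetD (pvColsB block ((wn : Int))) a [] ==
          PySem.List.pyGetD (pvColsB block ((wn : Int))) (a + 2 * ((k : Int) + 1) - 1) []) &&
        PySem.List.pyGetD (pvRowSpec block wn k) (a + 1) false)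
        = pvRowSpec block wn (k + 1) := by
      rw [hL, PySem.List.pyRange_zero_natCast, List.map_map]
      unfold pvRowSpec
      apply List.map_congr_left
      intro a ha
      rw [List.mem_range] at ha
      have ha' : a < wn - 2 * (k + 1) + 1 := ha
      simp only [Function.comp_apply]
      rw [hcol a (by omega),
          show ((a : Nat) : Int) + 2 * ((k : Int) + 1) - 1 = ((a + 2 * (k + 1) - 1 : Nat) : Int) by omega,
          hcol (a + 2 * (k + 1) - 1) (by omega),
          show ((a : Nat) : Int) + 1 = ((a + 1 : Nat) : Int) by omega,
          PySem.List.pyGetD_natCast, pvGetD_map_range _ _ _ _ (by omega : a + 1 < wn - 2 * k + 1),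
          pvPal_succ]
    show pvStepB (pvColsB block ((wn : Int))) ((wn : Int))
        (pvRowSpec block wn k, pvMirSpec block wn k) ((k : Int) + 1)
      = (pvRowSpec block wn (k + 1), pvMirSpec block wn (k + 1))
    unfold pvStepB
    simp only
    rw [show (2 : Int) * ((k : Int) + 1) = 2 * ((k : Int) + 1) by ring]
    rw [hcur, Prod.mk.injEq]
    refine ⟨rfl, ?_⟩
    · -- mirrors component
      have hjs : (if ((k : Int) + 1 == (wn : Int) - ((k : Int) + 1)) then [(k : Int) + 1]
            else [(k : Int) + 1, (wn : Int) - ((k : Int) + 1)]) = pvJsOf wn (k + 1) := by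
        unfold pvJsOf
        norm_num
      rw [hjs]
      have hfil : (pvJsOf wn (k + 1)).filter
            (fun j => PySem.List.pyGetD (pvRowSpec block wn (k + 1)) (j - ((k : Int) + 1)) false)
          = (pvJsOf wn (k + 1)).filter (fun j => pvPalB block (k + 1) (j - ((k + 1 : Nat) : Int)).toNat) := by
        apply List.filter_congr
        intro j hj
        have hj' : j = ((k + 1 : Nat) : Int) ∨ j = ((wn - (k + 1) : Nat) : Int) :=
          pvJsOf_mem wn (k + 1) j (by omega) hj
        have hrng : 0 ≤ j - ((k : Int) + 1) ∧ (j - ((k : Int) + 1)).toNat < wn - 2 * (k + 1) + 1 := by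
          rcases hj' with h | h <;> subst h <;> constructor <;> omega
        unfold pvRowSpec
        rw [show j - ((k : Int) + 1) = (((j - ((k : Int) + 1)).toNat : Nat) : Int) by omega,
            PySem.List.pyGetD_natCast, pvGetD_map_range _ _ _ _ hrng.2]
        congr 2
      rw [hfil]
      unfold pvMirSpec
      rw [List.range'_1_concat, List.flatMap_append]
      simp
      rw [show 1 + k = k + 1 by omega]
      apply List.filter_congr
      intro j hj
      rcases pvJsOf_mem wn (k + 1) j (by omega) hj with h | h <;> subst h <;> congr 1 <;> omega

-- membership in the collected mirrors list
lemma pvMem_mirSpec (block : List String) (wn : Nat)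
    (hrows : ∀ row ∈ block, wn ≤ row.toList.length) (j : Int) :
    j ∈ pvMirSpec block wn (wn / 2) ↔
      (1 : Int) ≤ j ∧ j < (wn : Int) ∧ pvMirrorAt block wn j.toNat = true := by
  unfold pvMirSpec
  simp only [List.mem_flatMap, List.mem_filter, List.mem_range'_1]
  constructor
  · rintro ⟨m, ⟨hm1, hm2⟩, hjmem, hpal⟩
    have hm2' : m ≤ wn / 2 := by omega
    have hj' : j = ((m : Nat) : Int) ∨ j = ((wn - m : Nat) : Int) :=
      pvJsOf_mem wn m j (by omega) hjmem
    rcases hj' with h | h <;> subst h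
    · refine ⟨by omega, by omega, ?_⟩
      rw [pvMirror_eq_pal block wn hrows _ (by simpa using hm1) (by omega)]
      have : min ((m : Nat) : Int).toNat (wn - ((m : Nat) : Int).toNat) = m := by omega
      rw [this]
      convert hpal using 2
      omega
    · refine ⟨by omega, by omega, ?_⟩
      rw [pvMirror_eq_pal block wn hrows _ (by omega) (by omega)]
      have : min ((wn - m : Nat) : Int).toNat (wn - ((wn - m : Nat) : Int).toNat) = m := by omega
      rw [this]
      convert hpal using 2
      omega
  · rintro ⟨h1, h2, hmir⟩
    set jn := j.toNat with hjn
    have hj : j = (jn : Int) := by omega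
    set m := min jn (wn - jn) with hm
    refine ⟨m, ⟨by omega, by omega⟩, ?_, ?_⟩
    · unfold pvJsOf
      split <;> rename_i hsp <;>
        simp only [beq_iff_eq] at hsp <;>
        simp only [List.mem_cons, List.not_mem_nil, or_false] <;> omega
    · rw [pvMirror_eq_pal block wn hrows jn (by omega) (by omega), ← hm] at hmir
      convert hmir using 2
      omega

-- ===== VERDICT (by name: the statement is the Claim_ definition above) =====
theorem verticalMirror_spec : Claim_equal_verticalMirror := by
  intro block _hdom hpre
  obtain ⟨hne, hlen⟩ := hpre
  set wn := pvW block with hwn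
  have hrows : ∀ row ∈ block, wn ≤ row.toList.length := by
    intro row hrow
    have := hlen row hrow
    rw [PySem.Str.len_eq, PySem.Str.len_eq] at this
    exact_mod_cast this
  show verticalMirror block = verticalMirror_alt block
  have hw : pvWidth block = (wn : Int) := pvWidth_eq block hne
  -- A's side: head of the ascending candidate list
  have hA : verticalMirror block =
      ((PySem.List.pyRange 1 (wn : Int) 1).filter
        (fun j => pvRowsEqA block (j - 1) j && pvTestVertical block j)).headD 0 := by
    rw [verticalMirror, hw, pvLoopA_eq_filter]
  -- B's side
  have hfold := pvFold_eq block wn (wn / 2) le_rfl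
  have hB : verticalMirror_alt block =
      (if (pvMirSpec block wn (wn / 2)).isEmpty then 0
        else (PySem.List.min? (pvMirSpec block wn (wn / 2)) (fun x => x)).getD 0) := by
    rw [verticalMirror_alt]
    simp only [hw]
    have h2 : PySem.Int.floordiv (wn : Int) 2 = ((wn / 2 : Nat) : Int) := by
      exact_mod_cast PySem.Int.floordiv_natCast wn 2
    rw [h2]
    rw [hfold]
  set cands := (PySem.List.pyRange 1 (wn : Int) 1).filter
      (fun j => pvRowsEqA block (j - 1) j && pvTestVertical block j) with hcands
  set mirs := pvMirSpec block wn (wn / 2) with hmirs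
  -- membership in cands
  have hmemC : ∀ j, j ∈ cands ↔ (1 : Int) ≤ j ∧ j < (wn : Int) ∧ pvMirrorAt block wn j.toNat = true := by
    intro j
    rw [hcands, List.mem_filter, PySem.List.mem_pyRange_one]
    constructor
    · rintro ⟨⟨ha, hb⟩, hcond⟩
      refine ⟨ha, hb, ?_⟩
      have hj : j = ((j.toNat : Nat) : Int) := by omega
      rw [hj] at hcond
      rwa [show ((j.toNat : Nat) : Int) - 1 = ((j.toNat : Nat) : Int) - 1 by rfl,
           pvCondA block hne j.toNat (by omega) (by omega)] at hcond
    · rintro ⟨ha, hb, hmir⟩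
      refine ⟨⟨ha, hb⟩, ?_⟩
      have hj : j = ((j.toNat : Nat) : Int) := by omega
      rw [hj, pvCondA block hne j.toNat (by omega) (by omega)]
      exact hmir
  have hmemB : ∀ j, j ∈ mirs ↔ (1 : Int) ≤ j ∧ j < (wn : Int) ∧ pvMirrorAt block wn j.toNat = true :=
    fun j => pvMem_mirSpec block wn hrows j
  have hmem : ∀ j, j ∈ mirs ↔ j ∈ cands := by
    intro j; rw [hmemB, hmemC]
  rw [hA, hB]
  -- cands is strictly sorted
  have hsorted : cands.Pairwise (· < ·) := (PySem.List.pairwise_lt_pyRange_one 1 (wn : Int)).filter _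
  cases hc : cands with
  | nil =>
    have : mirs = [] := by
      rw [List.eq_nil_iff_forall_not_mem]
      intro j hj
      have := (hmem j).mp hj
      rw [hc] at this
      simp at this
    rw [this]
    rfl
  | cons c rest =>
    have hcmem : c ∈ cands := by rw [hc]; exact List.mem_cons_self
    have hcmin : ∀ y ∈ cands, c ≤ y := by
      intro y hy
      rw [hc] at hy hsorted
      rcases List.mem_cons.mp hy with h | h
      · omega
      · exact le_of_lt ((List.pairwise_cons.mp hsorted).1 y h)
    have hmne : mirs ≠ [] := by
      intro h
      have := (hmem c).mpr hcmem
      rw [h] at this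
      simp at this
    rw [if_neg (by simpa [List.isEmpty_iff] using hmne)]
    obtain ⟨v, hv⟩ := Option.ne_none_iff_exists'.mp
      (fun h => hmne ((PySem.List.min?_eq_none_iff mirs (fun x : Int => x)).mp h))
    rw [hv]
    have hvmem : v ∈ mirs := PySem.List.min?_mem hv
    have hvmin : ∀ y ∈ mirs, v ≤ y := fun y hy => PySem.List.min?_isMin hv y hy
    have h1 : c ≤ v := hcmin v ((hmem v).mp hvmem)
    have h2 : v ≤ c := hvmin c ((hmem c).mpr hcmem)
    simp only [Option.getD_some, List.headD_cons]
    omega
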